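-- pv_equiv track=rewrite | github.com/yinxingmaimingg/count_distinct_palindrome | cdp.py | computeLpf
-- ===== SOURCE A (Python) =====
-- def isFactor(factor, whole):
-- 	for i in range(len(whole)-len(factor)+1):
-- 		if (factor==whole[i:i+len(factor)]):
-- 			return True
-- 	return False
--
-- def computeLpf(w):
-- 	n = len(w)
-- 	lpf = []
-- 	for i in range(len(w)):
-- 		lpf.append(0)
-- 		for l in range(1, n-i+1):
-- 			if (isFactor(w[i:i+l], w[:i+l-1])):
-- 				lpf[i] = l
-- 	return lpf
-- ===== SOURCE B (Python) =====
-- def computeLpf(w):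
--     # For each position i, the longest previous factor is the maximum over
--     # earlier positions j of the length of the common prefix of w[j:] and w[i:]
--     # (an occurrence of w[i:i+l] starting at j <= i-1 is exactly lcp >= l).
--     n = len(w)
--     lpf = []
--     for i in range(n):
--         best = 0
--         for j in range(i):
--             l = 0
--             while i + l < n and w[j + l] == w[i + l]:
--                 l += 1
--             if l > best:
--                 best = l
--         lpf.append(best)
--     return lpf
-- ===== Notes on version B (the rewrite author's own statement) =====
-- stated objective: faster
-- what changed: Instead of testing, for each position i and each candidate length l, whether w[i:i+l] occurs as a substring of w[:i+l-1] (a quadratic substring search per (i,l) pair), B computes for each earlier position j the longest common prefix of w[j:] and w[i:] with a single scan and takes the maximum over j, eliminating both the length loop and the inner substring search.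
import Mathlib
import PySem

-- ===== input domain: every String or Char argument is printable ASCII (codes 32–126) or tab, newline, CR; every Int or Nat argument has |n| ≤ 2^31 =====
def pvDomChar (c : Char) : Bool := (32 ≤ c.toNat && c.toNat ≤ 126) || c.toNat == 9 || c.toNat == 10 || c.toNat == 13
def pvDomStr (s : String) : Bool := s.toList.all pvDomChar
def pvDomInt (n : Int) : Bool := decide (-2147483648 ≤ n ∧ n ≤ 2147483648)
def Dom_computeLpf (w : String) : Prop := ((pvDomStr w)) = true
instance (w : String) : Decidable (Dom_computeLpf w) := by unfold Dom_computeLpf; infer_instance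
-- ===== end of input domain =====

-- B replaces A's per-(i,l) substring search by one longest-common-prefix scan per earlier
-- position j, taking the maximum over j (objective: faster).

-- ===== PORT A =====
-- isFactor(factor, whole): substring search comparing slices; the early 'return True' is List.any
def pvIsFactor (factor whole : List Char) : Bool :=
  (PySem.List.pyRange 0 ((whole.length : Int) - (factor.length : Int) + 1) 1).any
    (fun i => factor == PySem.List.slice whole (some i) (some (i + (factor.length : Int))))

def computeLpf (w : String) : List Int :=
  let s := w.toList
  let n : Int := (s.length : Int)
  (PySem.List.pyRange 0 n 1).foldl
    (fun lpf i =>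
      (PySem.List.pyRange 1 (n - i + 1) 1).foldl
        (fun lpf l =>
          if pvIsFactor (PySem.List.slice s (some i) (some (i + l)))
                        (PySem.List.slice s none (some (i + l - 1)))
          then lpf.set i.toNat l else lpf)
        (lpf ++ [0]))
    []

-- ===== PORT B =====
-- B's 'while i + l < n and w[j+l] == w[i+l]: l += 1' scan, as structural recursion on the two suffixes
def pvLcp : List Char → List Char → Nat
  | b :: bs, a :: as => if b = a then pvLcp bs as + 1 else 0
  | _, _ => 0

def computeLpf_alt (w : String) : List Int :=
  let s := w.toList
  let n : Int := (s.length : Int)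
  (PySem.List.pyRange 0 n 1).foldl
    (fun lpf i =>
      lpf ++ [(PySem.List.pyRange 0 i 1).foldl
        (fun best j =>
          let l : Int := (pvLcp (s.drop j.toNat) (s.drop i.toNat) : Int)
          if best < l then l else best) 0])
    []

-- ===== PRECONDITION & SPEC =====
def Spec_computeLpf (w : String) (out : List Int) : Prop := out = computeLpf_alt w
instance (w : String) (out : List Int) : Decidable (Spec_computeLpf w out) := by unfold Spec_computeLpf; infer_instance

-- ===== CLAIM (what is proved, stated in full; the proofs are below) =====
def Claim_equal_computeLpf : Prop := ∀ (w : String), Dom_computeLpf w → Spec_computeLpf w (computeLpf w)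

-- ===== LEMMAS AND PROOFS =====

-- the scalar value A's inner double loop computes for index i
def pvQA (s : List Char) (i l : Int) : Bool :=
  pvIsFactor (PySem.List.slice s (some i) (some (i + l)))
             (PySem.List.slice s none (some (i + l - 1)))

def pvScalA (s : List Char) (i : Int) : Int :=
  (PySem.List.pyRange 1 ((s.length : Int) - i + 1) 1).foldl
    (fun cur l => if pvQA s i l then l else cur) 0

-- the scalar value B's inner loop computes for index i
def pvScalB (s : List Char) (i : Int) : Int :=
  (PySem.List.pyRange 0 i 1).foldl
    (fun best j =>
      let l : Int := (pvLcp (s.drop j.toNat) (s.drop i.toNat) : Int)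
      if best < l then l else best) 0

-- A's inner loop only ever writes the last cell of the accumulator p ++ [x]
lemma pvInnerSet (L : List Int) (Q : Int → Bool) (p : List Int) (x : Int)
    (n : Nat) (hn : p.length = n) :
    L.foldl (fun lpf l => if Q l then lpf.set n l else lpf) (p ++ [x])
      = p ++ [L.foldl (fun cur l => if Q l then l else cur) x] := by
  subst hn
  induction L generalizing x with
  | nil => rfl
  | cons l t ih =>
      simp only [List.foldl_cons]
      by_cases h : Q l = true
      · simp only [h, if_true]
        rw [show (p ++ [x]).set p.length l = p ++ [l] by simp]
        exact ih l
      · simp only [h]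
        exact ih x

lemma pvA_eq_map (s : List Char) :
    (PySem.List.pyRange 0 (s.length : Int) 1).foldl
      (fun lpf i =>
        (PySem.List.pyRange 1 ((s.length : Int) - i + 1) 1).foldl
          (fun lpf l =>
            if pvIsFactor (PySem.List.slice s (some i) (some (i + l)))
                          (PySem.List.slice s none (some (i + l - 1)))
            then lpf.set i.toNat l else lpf)
          (lpf ++ [0]))
      []
    = (List.range s.length).map (fun i : Nat => pvScalA s (i : Int)) := by
  suffices h : ∀ m : Nat,
      (PySem.List.pyRange 0 (m : Int) 1).foldl
        (fun lpf i =>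
          (PySem.List.pyRange 1 ((s.length : Int) - i + 1) 1).foldl
            (fun lpf l =>
              if pvIsFactor (PySem.List.slice s (some i) (some (i + l)))
                            (PySem.List.slice s none (some (i + l - 1)))
              then lpf.set i.toNat l else lpf)
            (lpf ++ [0]))
        []
      = (List.range m).map (fun i : Nat => pvScalA s (i : Int)) by
    exact h s.length
  intro m
  induction m with
  | zero => simp [PySem.List.pyRange_one_eq_nil (by omega : (0:Int) ≤ 0)]
  | succ k ih =>
      rw [show ((k+1 : Nat) : Int) = (k:Int) + 1 by push_cast; ring,
        PySem.List.pyRange_one_succ_right (by positivity), List.foldl_append,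
        List.foldl_cons, List.foldl_nil, ih]
      rw [pvInnerSet _ _ ((List.range k).map (fun i : Nat => pvScalA s (i:Int))) 0 ((k:Int)).toNat (by simp)]
      simp only [List.range_succ, List.map_append, List.map_cons, List.map_nil]
      rfl

lemma pvB_eq_map (s : List Char) :
    (PySem.List.pyRange 0 (s.length : Int) 1).foldl
      (fun lpf i =>
        lpf ++ [(PySem.List.pyRange 0 i 1).foldl
          (fun best j =>
            let l : Int := (pvLcp (s.drop j.toNat) (s.drop i.toNat) : Int)
            if best < l then l else best) 0])
      []
    = (List.range s.length).map (fun i : Nat => pvScalB s (i : Int)) := by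
  rw [PySem.List.foldl_append_singleton_eq_map]
  rw [show (0:Int) = ((0:Nat):Int) from rfl, PySem.List.pyRange_one]
  simp only [List.map_map]
  apply List.map_congr_left
  intro a _
  simp [pvScalB]

-- running-maximum characterisation of B's inner loop
lemma pvRunMax (g : Nat → Int) (m : Nat) (hg : ∀ j, 0 ≤ g j) :
    let v := (PySem.List.pyRange 0 (m : Int) 1).foldl
      (fun best j => if best < g j.toNat then g j.toNat else best) 0
    (0 ≤ v) ∧ (v = 0 ∨ ∃ j < m, v = g j) ∧ (∀ j < m, g j ≤ v) := by
  intro v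
  induction m with
  | zero =>
      simp only [v, Nat.cast_zero, PySem.List.pyRange_one_eq_nil (by omega : (0:Int) ≤ 0)]
      simp
  | succ k ih =>
      have hsplit : PySem.List.pyRange 0 ((k:Int)+1) 1
          = PySem.List.pyRange 0 (k:Int) 1 ++ [(k:Int)] :=
        PySem.List.pyRange_one_succ_right (by positivity)
      simp only [v, Nat.cast_succ, hsplit, List.foldl_append, List.foldl_cons, List.foldl_nil]
      obtain ⟨h0, hcases, hmax⟩ := ih
      set w := (PySem.List.pyRange 0 (k:Int) 1).foldl
        (fun best j => if best < g j.toNat then g j.toNat else best) 0 with hw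
      have htn : ((k:Int)).toNat = k := by omega
      by_cases h : w < g k
      · rw [if_pos (htn ▸ h)]
        refine ⟨by simpa [htn] using hg k, Or.inr ⟨k, by omega, by rw [htn]⟩, ?_⟩
        intro j hj
        rcases Nat.lt_succ_iff_lt_or_eq.mp hj with hj' | rfl
        · exact le_of_lt (lt_of_le_of_lt (hmax j hj') (by simpa [htn] using h))
        · simp [htn]
      · rw [if_neg (by simpa [htn] using h)]
        refine ⟨h0, ?_, ?_⟩
        · rcases hcases with h' | ⟨j, hj, hje⟩
          · exact Or.inl h'
          · exact Or.inr ⟨j, by omega, hje⟩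
        · intro j hj
          rcases Nat.lt_succ_iff_lt_or_eq.mp hj with hj' | rfl
          · exact hmax j hj'
          · omega

-- last-satisfying characterisation of A's inner loop
lemma pvLastSat (Q : Int → Bool) (k : Nat) :
    let v := (PySem.List.pyRange 1 ((k : Int) + 1) 1).foldl
      (fun cur l => if Q l then l else cur) 0
    (v = 0 ∨ (1 ≤ v ∧ v ≤ (k : Int) ∧ Q v = true)) ∧
    (∀ l : Int, 1 ≤ l → l ≤ (k : Int) → Q l = true → l ≤ v) := by
  intro v
  induction k with
  | zero =>
      simp only [v, Nat.cast_zero, zero_add,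
        PySem.List.pyRange_one_eq_nil (by omega : (1:Int) ≤ 1)]
      exact ⟨Or.inl rfl, by intro l h1 h2; omega⟩
  | succ m ih =>
      have hsplit : PySem.List.pyRange 1 ((m:Int)+1+1) 1
          = PySem.List.pyRange 1 ((m:Int)+1) 1 ++ [(m:Int)+1] :=
        PySem.List.pyRange_one_succ_right (by omega)
      simp only [v, Nat.cast_succ, hsplit, List.foldl_append, List.foldl_cons, List.foldl_nil]
      obtain ⟨hcases, hmax⟩ := ih
      set w := (PySem.List.pyRange 1 ((m:Int)+1) 1).foldl
        (fun cur l => if Q l then l else cur) 0 with hw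
      by_cases h : Q ((m:Int)+1) = true
      · rw [if_pos h]
        refine ⟨Or.inr ⟨by omega, by omega, h⟩, ?_⟩
        intro l h1 h2 _; omega
      · rw [if_neg (by simpa using h)]
        refine ⟨?_, ?_⟩
        · rcases hcases with h' | ⟨a, b, c⟩
          · exact Or.inl h'
          · exact Or.inr ⟨a, by omega, c⟩
        · intro l h1 h2 hq
          rcases (by omega : l ≤ (m:Int) ∨ l = (m:Int)+1) with h' | rfl
          · exact hmax l h1 h' hq
          · exact absurd hq h

lemma pvLcp_le_right (a b : List Char) : pvLcp a b ≤ b.length := by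
  induction a generalizing b with
  | nil => simp [pvLcp]
  | cons x xs ih =>
      cases b with
      | nil => simp [pvLcp]
      | cons y ys =>
          simp only [pvLcp]
          split_ifs <;> simp [Nat.succ_le_succ (ih ys)]

lemma pvLcp_take (a b : List Char) : a.take (pvLcp a b) = b.take (pvLcp a b) := by
  induction a generalizing b with
  | nil => cases b <;> simp [pvLcp]
  | cons x xs ih =>
      cases b with
      | nil => simp [pvLcp]
      | cons y ys =>
          simp only [pvLcp]
          split_ifs with h
          · simp [h, ih ys]
          · simp

lemma pvLcp_ge (a b : List Char) (l : Nat) (ha : l ≤ a.length) (hb : l ≤ b.length)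
    (h : a.take l = b.take l) : l ≤ pvLcp a b := by
  induction a generalizing b l with
  | nil => simp_all
  | cons x xs ih =>
      cases l with
      | zero => simp
      | succ m =>
          cases b with
          | nil => simp at hb
          | cons y ys =>
              simp only [List.take_succ_cons, List.cons.injEq] at h
              simp only [pvLcp]
              rw [if_pos h.1]
              have := ih ys m (by simpa using ha) (by simpa using hb) h.2
              omega

-- an occurrence of w[i:i+l] in w[:i+l-1] is an occurrence at some start j ≤ i-1
lemma pvSliceShift (s : List Char) (i l q : Nat) (hq : q < i) :
    PySem.List.slice (s.take (i+l-1)) (some (q:Int)) (some ((q:Int) + (l:Int)))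
      = (s.drop q).take l := by
  rw [PySem.List.slice_natCast_add, List.drop_take, List.take_take]
  congr 1
  omega

lemma pvQA_iff (s : List Char) (i l : Nat) (hi : i < s.length)
    (hl1 : 1 ≤ l) (hl2 : l ≤ s.length - i) :
    pvQA s (i : Int) (l : Int) = true ↔
      ∃ j < i, (s.drop j).take l = (s.drop i).take l := by
  have hil : i + l ≤ s.length := by omega
  have hfac : PySem.List.slice s (some (i:Int)) (some ((i:Int) + (l:Int)))
      = (s.drop i).take l := PySem.List.slice_natCast_add s i l
  have hto : (i:Int) + (l:Int) - 1 = ((i + l - 1 : Nat) : Int) := by omega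
  have hwhole : PySem.List.slice s none (some ((i:Int)+(l:Int)-1)) = s.take (i+l-1) := by
    rw [hto]; exact PySem.List.slice_to_natCast s (i+l-1)
  have hflen : ((s.drop i).take l).length = l := by simp; omega
  have hwlen : (s.take (i+l-1)).length = i + l - 1 := by simp; omega
  unfold pvQA pvIsFactor
  rw [hfac, hwhole, hflen, hwlen]
  have hrange : ((i + l - 1 : Nat) : Int) - (l:Int) + 1 = (i:Int) := by omega
  rw [hrange, List.any_eq_true]
  constructor
  · rintro ⟨p, hp, hbeq⟩
    rw [PySem.List.mem_pyRange_one] at hp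
    have hpq : p = (p.toNat : Int) := by omega
    have hqi : p.toNat < i := by omega
    rw [hpq, pvSliceShift s i l p.toNat hqi] at hbeq
    exact ⟨p.toNat, hqi, (beq_iff_eq.mp hbeq).symm⟩
  · rintro ⟨j, hj, hEq⟩
    refine ⟨(j:Int), ?_, ?_⟩
    · rw [PySem.List.mem_pyRange_one]; omega
    · rw [pvSliceShift s i l j hj]
      exact beq_iff_eq.mpr hEq.symm

lemma pvScal_eq (s : List Char) (i : Nat) (hi : i < s.length) :
    pvScalA s (i : Int) = pvScalB s (i : Int) := by
  have hAeq : pvScalA s (i : Int)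
      = (PySem.List.pyRange 1 (((s.length - i : Nat) : Int) + 1) 1).foldl
          (fun cur l => if pvQA s (i:Int) l then l else cur) 0 := by
    unfold pvScalA
    congr 2
    omega
  set g : Nat → Int := fun j => (pvLcp (s.drop j) (s.drop i) : Int) with hg
  have hBeq : pvScalB s (i : Int)
      = (PySem.List.pyRange 0 ((i:Nat) : Int) 1).foldl
          (fun best j => if best < g j.toNat then g j.toNat else best) 0 := by
    unfold pvScalB
    simp [hg]
  have hgpos : ∀ j, 0 ≤ g j := fun j => by positivity
  obtain ⟨hB0, hBcases, hBmax⟩ := pvRunMax g i hgpos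
  obtain ⟨hAcases, hAmax⟩ := pvLastSat (pvQA s (i:Int)) (s.length - i)
  rw [hAeq, hBeq]
  set vA := (PySem.List.pyRange 1 (((s.length - i : Nat) : Int) + 1) 1).foldl
      (fun cur l => if pvQA s (i:Int) l then l else cur) 0 with hva
  set vB := (PySem.List.pyRange 0 ((i:Nat) : Int) 1).foldl
      (fun best j => if best < g j.toNat then g j.toNat else best) 0 with hvb
  apply le_antisymm
  · rcases hAcases with h0 | ⟨h1, h2, hQ⟩
    · omega
    · have hcast : vA = ((vA.toNat : Nat) : Int) := by omega
      have hl1 : 1 ≤ vA.toNat := by omega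
      have hl2 : vA.toNat ≤ s.length - i := by omega
      rw [hcast] at hQ
      obtain ⟨j, hj, hEq⟩ := (pvQA_iff s i vA.toNat hi hl1 hl2).mp hQ
      have hle : vA.toNat ≤ pvLcp (s.drop j) (s.drop i) :=
        pvLcp_ge _ _ _ (by simp; omega) (by simp; omega) hEq
      have := hBmax j hj
      simp only [hg] at this
      omega
  · rcases hBcases with h0 | ⟨j, hj, hje⟩
    · rcases hAcases with h' | ⟨h1, _, _⟩ <;> omega
    · set m := pvLcp (s.drop j) (s.drop i) with hm
      rcases Nat.eq_zero_or_pos m with hm0 | hmpos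
      · have : vB = 0 := by rw [hje, hg]; simp [← hm, hm0]
        rcases hAcases with h' | ⟨h1, _, _⟩ <;> omega
      · have hm2 : m ≤ s.length - i := by
          have := pvLcp_le_right (s.drop j) (s.drop i)
          simp at this; omega
        have hQ : pvQA s (i:Int) (m:Int) = true :=
          (pvQA_iff s i m hi hmpos hm2).mpr ⟨j, hj, by rw [hm]; exact pvLcp_take _ _⟩
        have hup := hAmax (m:Int) (by omega) (by omega) hQ
        have : vB = (m:Int) := by rw [hje, hg]
        omega

-- ===== VERDICT (by name: the statement is the Claim_ definition above) =====
theorem computeLpf_spec : Claim_equal_computeLpf := by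
  intro w _
  show computeLpf w = computeLpf_alt w
  simp only [computeLpf, computeLpf_alt]
  rw [pvA_eq_map, pvB_eq_map]
  exact List.map_congr_left (fun i hi => pvScal_eq w.toList i (List.mem_range.mp hi))
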